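-- pv_equiv track=rewrite | github.com/chihiroanihr/COMP479_Fall-2022 | P3/s2_utils.py | TFtd
-- ===== SOURCE A (Python) =====
-- from collections import Counter
--
-- def TFtd(index):
--     index_TFtd = {}
--
--     for term, postings in index.items():
--         '''
--         examle:
--         if {term1: 12 -> 12 -> 134 -> 156 -> 167 -> 167 -> 167}
--         then
--             term_freq_dict = {12: 2, 134: 1, 156: 1, 167: 3}
--         '''
--         term_freq_dict = dict(Counter(postings))
--
--         # sort by docIDs
--         sorted_term_freq_dict = dict(sorted(term_freq_dict.items(), key=lambda t: t[0]))
--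
--         # append to index
--         index_TFtd[term] = sorted_term_freq_dict
--
--     # sort by terms
--     index_TFtd = dict(sorted(index_TFtd.items(), key=lambda x: x[0]))
--
--     # return dictionary of {term: {docID1: term_freq, docID2: term_freq, ...}, ...}
--     return index_TFtd
-- ===== SOURCE B (Python) =====
-- def TFtd(index):
--     # Sort terms once; per term, sort the postings and count runs of equal
--     # docIDs in a single linear pass (no Counter, no per-dict re-sort).
--     out = {}
--     for term in sorted(index):
--         postings = sorted(index[term])
--         freq = {}
--         i = 0
--         n = len(postings)
--         while i < n:
--             j = i + 1
--             while j < n and postings[j] == postings[i]: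
--                 j += 1
--             freq[postings[i]] = j - i
--             i = j
--         out[term] = freq
--     return out
-- ===== Notes on version B (the rewrite author's own statement) =====
-- stated objective: alternative
-- what changed: Replaces Counter-then-sort-each-dict with: sort the terms once, sort each postings list, and build each inner frequency dict by a single linear pass grouping consecutive equal docIDs.
import Mathlib
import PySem

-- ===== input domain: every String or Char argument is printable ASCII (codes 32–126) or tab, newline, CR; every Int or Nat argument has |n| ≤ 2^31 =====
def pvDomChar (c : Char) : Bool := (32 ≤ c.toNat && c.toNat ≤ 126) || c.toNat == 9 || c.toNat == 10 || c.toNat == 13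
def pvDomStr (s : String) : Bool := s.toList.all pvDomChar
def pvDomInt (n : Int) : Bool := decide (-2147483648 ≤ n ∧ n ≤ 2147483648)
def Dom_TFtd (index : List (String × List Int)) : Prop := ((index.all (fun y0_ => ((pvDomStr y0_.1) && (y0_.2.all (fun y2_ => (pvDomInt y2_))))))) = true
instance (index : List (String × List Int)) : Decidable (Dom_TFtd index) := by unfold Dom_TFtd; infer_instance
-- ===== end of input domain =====

-- B replaces Counter-then-sort-per-dict with term-sorted iteration plus one linear
-- grouping pass over each sorted postings list (alternative algorithm, same cost).

-- ===== PORT A =====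
-- dict(sorted(dict(Counter(postings)).items(), key=lambda t: t[0])) for one term
def pvInnerA (postings : List Int) : List (Int × Int) :=
  PySem.List.sorted (PySem.Dict.counter postings).items (fun t => t.1) false

def TFtd (index : List (String × List Int)) : List (String × List (Int × Int)) :=
  -- for term, postings in index.items(): index_TFtd[term] = sorted_term_freq_dict
  let idx : PySem.Dict String (List (Int × Int)) :=
    index.foldl (fun acc p => acc.insert p.1 (pvInnerA p.2)) PySem.Dict.empty
  -- dict(sorted(index_TFtd.items(), key=lambda x: x[0]))
  PySem.List.sorted idx.items (fun x => x.1) false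

-- ===== PORT B =====
-- the while-loop grouping pass of Source B: each run of consecutive equal docIDs in
-- a sorted list becomes one (docID, run length) entry (inner while = takeWhile)
def pvRuns (l : List Int) : List (Int × Int) :=
  match l with
  | [] => []
  | x :: xs =>
      (x, (1 + (xs.takeWhile (· == x)).length : Int)) :: pvRuns (xs.dropWhile (· == x))
termination_by l.length
decreasing_by
  simpa [Nat.lt_succ_iff] using List.length_dropWhile_le (· == x) xs

def TFtd_alt (index : List (String × List Int)) : List (String × List (Int × Int)) :=
  let d := PySem.Dict.ofList index
  -- for term in sorted(index): out[term] = freq  (freq = the grouping pass)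
  let out : PySem.Dict String (List (Int × Int)) :=
    (PySem.List.sorted d.keys (fun k => k) false).foldl
      (fun out term =>
        -- index[term]: total here since term ∈ d.keys
        out.insert term (pvRuns (PySem.List.sorted (d.getD term []) (fun x => x) false)))
      PySem.Dict.empty
  out.items

-- ===== PRECONDITION & SPEC =====
def Spec_TFtd (index : List (String × List Int)) (out : List (String × List (Int × Int))) : Prop := out = TFtd_alt index
instance (index : List (String × List Int)) (out : List (String × List (Int × Int))) : Decidable (Spec_TFtd index out) := by unfold Spec_TFtd; infer_instance

-- ===== CLAIM (what is proved, stated in full; the proofs are below) =====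
def Claim_equal_TFtd : Prop := ∀ (index : List (String × List Int)), Dom_TFtd index → Spec_TFtd index (TFtd index)

-- ===== LEMMAS AND PROOFS =====

theorem pv_pairwise_lt {α : Type} [LinearOrder α] {l : List α}
    (h1 : l.Pairwise (· ≤ ·)) (h2 : l.Nodup) : l.Pairwise (· < ·) :=
  (h1.and h2).imp (fun h => lt_of_le_of_ne h.1 h.2)

-- sorting pairs (k, v k) by key = sorting the (distinct) keys, then pairing
theorem pv_sorted_map_pairs {α β : Type} [LinearOrder α] (K : List α) (hK : K.Nodup)
    (v : α → β) :
    PySem.List.sorted (K.map (fun k => (k, v k))) (fun p => p.1) false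
      = (PySem.List.sorted K (fun k => k) false).map (fun k => (k, v k)) := by
  apply PySem.List.sorted_eq_of_perm_of_pairwise_lt
  · exact (PySem.List.sorted_perm K _ false).map _
  · have hnd : (PySem.List.sorted K (fun k => k) false).Nodup :=
      ((PySem.List.sorted_perm K (fun k => k) false).nodup_iff).mpr hK
    rw [List.pairwise_map]
    exact pv_pairwise_lt (PySem.List.sorted_pairwise K (fun k => k)) hnd

theorem pv_foldl_add_cons {α : Type} [BEq α] [LawfulBEq α] (d : List α) (x : α)
    (hx : x ∉ d) (s : PySem.Set α) :
    d.foldl PySem.Set.add (x :: s) = x :: d.foldl PySem.Set.add s := by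
  induction d generalizing s with
  | nil => rfl
  | cons y ys ih =>
      have hyx : (y == x) = false := by
        simp only [beq_eq_false_iff_ne]
        rintro rfl; exact hx List.mem_cons_self
      have hadd : PySem.Set.add (x :: s) y = x :: PySem.Set.add s y := by
        simp [PySem.Set.add, PySem.Set.contains, hyx]
        split <;> simp
      rw [List.foldl_cons, hadd, List.foldl_cons,
        ih (fun h => hx (List.mem_cons_of_mem _ h))]

-- Set.ofList keeps a subsequence of the input
theorem pv_foldl_add_sublist {α : Type} [BEq α] (l : List α) (s : List α) :
    (l.foldl PySem.Set.add s).Sublist (s ++ l) := by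
  induction l generalizing s with
  | nil => simp
  | cons y ys ih =>
      have h1 : (PySem.Set.add s y).Sublist (s ++ [y]) := by
        simp only [PySem.Set.add]
        split
        · exact List.sublist_append_left s [y]
        · exact List.Sublist.refl _
      have h2 := (ih (PySem.Set.add s y)).trans (h1.append_right ys)
      simpa using h2

theorem pv_ofList_sublist {α : Type} [BEq α] (l : List α) :
    (PySem.Set.ofList l).Sublist l := by
  rw [PySem.Set.ofList_eq_foldl]
  simpa using pv_foldl_add_sublist l []

-- the grouping pass on a sorted list = distinct elements paired with their counts
theorem pv_runs_eq (l : List Int) (h : l.Pairwise (· ≤ ·)) :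
    pvRuns l = (PySem.Set.ofList l).map (fun k => (k, (l.count k : Int))) := by
  induction l using pvRuns.induct with
  | case1 => simp [pvRuns, PySem.Set.ofList]
  | case2 x xs ih =>
      have hxs : xs.Pairwise (· ≤ ·) := h.of_cons
      have hxle : ∀ y ∈ xs, x ≤ y := fun y hy => (List.pairwise_cons.mp h).1 y hy
      set t := xs.takeWhile (· == x) with ht
      set d := xs.dropWhile (· == x) with hd
      have hsplit : xs = t ++ d := (List.takeWhile_append_dropWhile).symm
      have htx : ∀ y ∈ t, y = x := fun y hy => by
        have := List.mem_takeWhile_imp hy; simpa using this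
      have hxd : x ∉ d := by
        intro hxm
        cases hdd : d with
        | nil => rw [hdd] at hxm; exact absurd hxm (List.not_mem_nil)
        | cons hh tt =>
            have hhne : ¬ (hh == x) = true := by
              have := List.head?_dropWhile_not (· == x) xs
              rw [← hd, hdd] at this; simpa using this
            have hhx : hh ≠ x := by simpa using hhne
            have hhmem : hh ∈ xs := by rw [hsplit, hdd]; simp
            have hlt : x < hh := lt_of_le_of_ne (hxle hh hhmem) (Ne.symm hhx)
            rw [hdd] at hxm
            rcases List.mem_cons.mp hxm with rfl | hxtt
            · exact hhx rfl
            · have hdp : (hh :: tt).Pairwise (· ≤ ·) := by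
                rw [hsplit, hdd] at hxs
                exact (List.pairwise_append.mp hxs).2.1
              have : hh ≤ x := (List.pairwise_cons.mp hdp).1 x hxtt
              exact absurd hlt (not_lt.mpr this)
      have hcountx : ((x :: xs).count x : Int) = 1 + (t.length : Int) := by
        have h1 : xs.count x = t.length := by
          rw [hsplit, List.count_append]
          have h2 : t.count x = t.length := by
            rw [List.count_eq_length]; intro y hy; rw [htx y hy]
          have h3 : d.count x = 0 := List.count_eq_zero.mpr hxd
          omega
        rw [List.count_cons_self, h1]; push_cast; ring
      have hdp : d.Pairwise (· ≤ ·) := by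
        rw [hsplit] at hxs
        exact (List.pairwise_append.mp hxs).2.1
      have hset : PySem.Set.ofList (x :: xs) = x :: PySem.Set.ofList d := by
        rw [PySem.Set.ofList_eq_foldl, PySem.Set.ofList_eq_foldl]
        rw [List.foldl_cons]
        have hstart : PySem.Set.add ([] : PySem.Set Int) x = [x] := rfl
        have htfold : ∀ (u : List Int), (∀ y ∈ u, y = x) →
            u.foldl PySem.Set.add [x] = [x] := by
          intro u
          induction u with
          | nil => intro _; rfl
          | cons y ys ihy =>
              intro hu
              have hy : y = x := hu y List.mem_cons_self
              subst hy
              have hone : PySem.Set.add [y] y = [y] := by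
                simp [PySem.Set.add, PySem.Set.contains]
              rw [List.foldl_cons, hone]
              exact ihy (fun z hz => hu z (List.mem_cons_of_mem _ hz))
        rw [hstart, hsplit, List.foldl_append, htfold t htx,
          pv_foldl_add_cons d x hxd]
      have hcountd : ∀ k ∈ PySem.Set.ofList d,
          ((x :: xs).count k : Int) = (d.count k : Int) := by
        intro k hk
        have hkd : k ∈ d := (PySem.Set.mem_ofList d k).mp hk
        have hkx : k ≠ x := fun hkx => hxd (hkx ▸ hkd)
        have hkt : k ∉ t := fun hkt => hkx (htx k hkt)
        simp [hsplit, List.count_append,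
          List.count_eq_zero.mpr hkt, Ne.symm hkx]
      rw [pvRuns, ih hdp, hset, List.map_cons]
      congr 1
      · rw [hcountx]
      · exact List.map_congr_left (fun k hk => by rw [← hcountd k hk])

-- the per-term value: A's inner computation = B's inner computation
theorem pv_inner_eq (ps : List Int) :
    pvInnerA ps = pvRuns (PySem.List.sorted ps (fun x => x) false) := by
  set s := PySem.List.sorted ps (fun x => x) false with hs
  have hperm : s.Perm ps := PySem.List.sorted_perm ps _ false
  have hsp : s.Pairwise (· ≤ ·) := PySem.List.sorted_pairwise ps (fun x => x)
  have hofperm : (PySem.Set.ofList s).Perm (PySem.Set.ofList ps) := by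
    rw [List.perm_ext_iff_of_nodup (PySem.Set.nodup_ofList s) (PySem.Set.nodup_ofList ps)]
    intro a
    rw [PySem.Set.mem_ofList, PySem.Set.mem_ofList, hperm.mem_iff]
  have hsorted_of : PySem.List.sorted (PySem.Set.ofList ps) (fun k => k) false
      = PySem.Set.ofList s := by
    apply PySem.List.sorted_eq_of_perm_of_pairwise_lt _ _ _ hofperm
    exact pv_pairwise_lt (List.Pairwise.sublist (pv_ofList_sublist s) hsp) (PySem.Set.nodup_ofList s)
  calc pvInnerA ps
      = PySem.List.sorted ((PySem.Set.ofList ps).map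
          (fun k => (k, (ps.count k : Int)))) (fun p => p.1) false := by
        rw [pvInnerA, PySem.Dict.items_counter]
    _ = (PySem.List.sorted (PySem.Set.ofList ps) (fun k => k) false).map
          (fun k => (k, (ps.count k : Int))) :=
        pv_sorted_map_pairs _ (PySem.Set.nodup_ofList ps) _
    _ = (PySem.Set.ofList s).map (fun k => (k, (s.count k : Int))) := by
        rw [hsorted_of]
        exact List.map_congr_left (fun k _ => by rw [hperm.count_eq])
    _ = pvRuns s := (pv_runs_eq s hsp).symm

-- lookups in A's accumulated dict are lookups in dict(index), composed with pvInnerA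
theorem pv_get_foldA (l : List (String × List Int))
    (d1 : PySem.Dict String (List (Int × Int))) (d2 : PySem.Dict String (List Int))
    (hinv : ∀ k, d1.get? k = (d2.get? k).map pvInnerA) :
    ∀ k, (l.foldl (fun acc p => acc.insert p.1 (pvInnerA p.2)) d1).get? k
      = ((l.foldl (fun acc p => acc.insert p.1 p.2) d2).get? k).map pvInnerA := by
  induction l generalizing d1 d2 with
  | nil => exact hinv
  | cons p ps ih =>
      refine ih _ _ (fun k => ?_)
      rw [PySem.Dict.get?_insert, PySem.Dict.get?_insert]
      split
      · rfl
      · exact hinv k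

-- ===== VERDICT (by name: the statement is the Claim_ definition above) =====
theorem TFtd_spec : Claim_equal_TFtd := by
  intro index _
  show TFtd index = TFtd_alt index
  rw [TFtd, TFtd_alt]
  set dA : PySem.Dict String (List (Int × Int)) :=
    index.foldl (fun acc p => acc.insert p.1 (pvInnerA p.2)) PySem.Dict.empty with hdA
  set dI : PySem.Dict String (List Int) := PySem.Dict.ofList index with hdI
  have hdI' : dI = index.foldl (fun acc p => acc.insert p.1 p.2) PySem.Dict.empty := rfl
  have hget : ∀ k, dA.get? k = (dI.get? k).map pvInnerA := by
    rw [hdA, hdI']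
    exact pv_get_foldA index _ _ (fun k => by
      rw [PySem.Dict.get?_empty, PySem.Dict.get?_empty]; rfl)
  have hkeys : dA.keys = dI.keys := by
    rw [hdA, hdI',
      PySem.Dict.keys_foldl_insert_key index Prod.fst (fun _ p => pvInnerA p.2),
      PySem.Dict.keys_foldl_insert_key index Prod.fst (fun _ p => p.2)]
    simp [PySem.Dict.keys_empty]
  have hnodup : dA.keys.Nodup := by
    rw [hdA]
    exact PySem.Dict.nodup_keys_foldl_insert_key index Prod.fst _ _
      (by rw [PySem.Dict.keys_empty]; exact List.nodup_nil)
  have hA : PySem.List.sorted dA.items (fun x => x.1) false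
      = (PySem.List.sorted dA.keys (fun k => k) false).map
          (fun k => (k, dA.getD k [])) := by
    rw [PySem.Dict.items_eq_map_keys dA hnodup []]
    exact pv_sorted_map_pairs dA.keys hnodup _
  have hsortednd : (PySem.List.sorted dI.keys (fun k => k) false).Nodup :=
    ((PySem.List.sorted_perm dI.keys (fun k => k) false).nodup_iff).mpr
      (hkeys ▸ hnodup)
  have hB : ((PySem.List.sorted dI.keys (fun k => k) false).foldl
        (fun out term => out.insert term
          (pvRuns (PySem.List.sorted (dI.getD term []) (fun x => x) false)))
        PySem.Dict.empty).items
      = (PySem.List.sorted dI.keys (fun k => k) false).map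
          (fun term => (term,
            pvRuns (PySem.List.sorted (dI.getD term []) (fun x => x) false))) := by
    have := PySem.Dict.items_foldl_insert_fresh
      (PySem.List.sorted dI.keys (fun k => k) false) (fun a => a)
      (fun term => pvRuns (PySem.List.sorted (dI.getD term []) (fun x => x) false))
      PySem.Dict.empty
      (fun a _ => PySem.Dict.contains_empty a)
      (by simpa using hsortednd)
    simpa using this
  rw [hA, hB, hkeys]
  refine List.map_congr_left (fun k hk => ?_)
  have hkK : k ∈ dI.keys := ((PySem.List.sorted_perm dI.keys (fun k => k) false).mem_iff).mp hk
  have hsome : ∃ ps, dI.get? k = some ps := by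
    rcases h : dI.get? k with _ | ps
    · exact absurd ((PySem.Dict.get?_eq_none_iff_not_mem_keys dI k).mp h) (not_not.mpr hkK)
    · exact ⟨ps, rfl⟩
  rcases hsome with ⟨ps, hps⟩
  have h1 : dA.getD k [] = pvInnerA ps := by
    rw [PySem.Dict.getD_eq_get?_getD, hget k, hps]; rfl
  have h2 : dI.getD k [] = ps := by
    rw [PySem.Dict.getD_eq_get?_getD, hps]; rfl
  rw [h1, h2, pv_inner_eq]
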